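-- pv_equiv track=rewrite | github.com/TylerJ1ger/data-enhance | backend/app/services/seo/utils.py | is_soft_404_content
-- ===== SOURCE A (Python) =====
-- def is_soft_404_content(text: str) -> bool:
--     """
--     检测内容是否暗示这是一个"软404"页面
--     """
--     soft_404_patterns = [
--         "找不到页面", "不存在", "已删除", "page not found", "404",
--         "does not exist", "no longer available", "been removed",
--         "无法找到", "抱歉，您访问的页面不存在", "sorry, the page you requested was not found"
--     ]
--
--     text_lower = text.lower()
--     for pattern in soft_404_patterns:
--         if pattern.lower() in text_lower:
--             return True
--
--     return False
-- ===== SOURCE B (Python) =====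
-- _SOFT_404_PATTERNS = [
--     "找不到页面", "不存在", "已删除", "page not found", "404",
--     "does not exist", "no longer available", "been removed",
--     "无法找到", "抱歉，您访问的页面不存在", "sorry, the page you requested was not found"
-- ]
--
-- # Index the lowered patterns by their first character, so one left-to-right scan
-- # of the text only tests the patterns that could start at the current position.
-- _BY_FIRST = {}
-- for _p in _SOFT_404_PATTERNS:
--     _q = _p.lower()
--     _BY_FIRST.setdefault(_q[0], []).append(_q)
--
--
-- def is_soft_404_content(text: str) -> bool:
--     """
--     检测内容是否暗示这是一个"软404"页面
--     """
--     t = text.lower()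
--     for i, c in enumerate(t):
--         for p in _BY_FIRST.get(c, []):
--             if t.startswith(p, i):
--                 return True
--     return False
-- ===== Notes on version B (the rewrite author's own statement) =====
-- stated objective: alternative
-- what changed: Replaces the pattern-major loop (a full substring scan of the text per pattern) with a single left-to-right scan of the lowered text that dispatches through a first-character index built once at module load, so at each position only patterns that could start there are tested.
import Mathlib
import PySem

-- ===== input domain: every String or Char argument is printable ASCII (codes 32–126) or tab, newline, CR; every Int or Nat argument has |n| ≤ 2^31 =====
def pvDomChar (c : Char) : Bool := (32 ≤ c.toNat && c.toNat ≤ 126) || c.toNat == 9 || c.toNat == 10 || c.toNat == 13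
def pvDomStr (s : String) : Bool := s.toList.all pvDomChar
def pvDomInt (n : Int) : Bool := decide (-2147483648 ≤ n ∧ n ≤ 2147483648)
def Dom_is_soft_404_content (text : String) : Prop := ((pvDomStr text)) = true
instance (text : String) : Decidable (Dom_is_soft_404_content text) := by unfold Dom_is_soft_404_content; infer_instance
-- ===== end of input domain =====

-- B replaces A's pattern-major loop (one substring scan per pattern) by a single
-- left-to-right scan of the lowered text dispatching through a first-character index.

-- ===== PORT A =====
-- A's local pattern list
def pv404Patterns : List String :=
  ["找不到页面", "不存在", "已删除", "page not found", "404",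
   "does not exist", "no longer available", "been removed",
   "无法找到", "抱歉，您访问的页面不存在", "sorry, the page you requested was not found"]

-- A's 'for pattern in …: if pattern.lower() in text_lower: return True' loop
def pvLoopA (ps : List String) (textLower : String) : Bool :=
  match ps with
  | [] => false
  | p :: ps' =>
    if PySem.Str.isIn (PySem.Str.lower p) textLower then true else pvLoopA ps' textLower

def is_soft_404_content (text : String) : Bool :=
  pvLoopA pv404Patterns (PySem.Str.lower text)

-- ===== PORT B =====
-- B's module-level pattern list
def pvSoft404Patterns : List String :=
  ["找不到页面", "不存在", "已删除", "page not found", "404",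
   "does not exist", "no longer available", "been removed",
   "无法找到", "抱歉，您访问的页面不存在", "sorry, the page you requested was not found"]

-- B's module-level '_BY_FIRST.setdefault(_q[0], []).append(_q)' loop
-- (_q[0] of the nonempty literal patterns; pyGetD with default ' ' is exact here)
def pvByFirst : PySem.Dict Char (List (List Char)) :=
  pvSoft404Patterns.foldl
    (fun d p =>
      let q := (PySem.Str.lower p).toList
      PySem.Dict.modify d (PySem.List.pyGetD q 0 ' ') [] (· ++ [q]))
    PySem.Dict.empty

-- B's 'for i, c in enumerate(t): for p in _BY_FIRST.get(c, []): if t.startswith(p, i): return True'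
-- (Python's t.startswith(p, i) with 0 ≤ i ≤ len(t) is startswith on t[i:], i.e. t.drop i)
def pvScanB (t : List Char) (rest : List Char) (i : Nat) : Bool :=
  match rest with
  | [] => false
  | c :: cs =>
    if (PySem.Dict.getD pvByFirst c []).any
        (fun p => PySem.Chars.startswith (t.drop i) p) then true
    else pvScanB t cs (i + 1)

def is_soft_404_content_alt (text : String) : Bool :=
  let t := (PySem.Str.lower text).toList
  pvScanB t t 0

-- ===== PRECONDITION & SPEC =====
def Spec_is_soft_404_content (text : String) (out : Bool) : Prop := out = is_soft_404_content_alt text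
instance (text : String) (out : Bool) : Decidable (Spec_is_soft_404_content text out) := by unfold Spec_is_soft_404_content; infer_instance

-- ===== CLAIM (what is proved, stated in full; the proofs are below) =====
def Claim_equal_is_soft_404_content : Prop := ∀ (text : String), Dom_is_soft_404_content text → Spec_is_soft_404_content text (is_soft_404_content text)

-- ===== LEMMAS AND PROOFS =====

-- A's early-return loop is an 'any' over the pattern list
theorem pvLoopA_eq_any (ps : List String) (t : String) :
    pvLoopA ps t = ps.any (fun p => PySem.Str.isIn (PySem.Str.lower p) t) := by
  induction ps with
  | nil => rfl
  | cons p ps ih =>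
    rw [pvLoopA, List.any_cons, ih]
    split_ifs with h
    · rw [h, Bool.true_or]
    · rw [Bool.not_eq_true] at h; rw [h, Bool.false_or]

-- the first-character index maps c to exactly the lowered patterns beginning with c
theorem getD_pvByFirst (c : Char) :
    PySem.Dict.getD pvByFirst c []
      = (pvSoft404Patterns.map (fun p => (PySem.Str.lower p).toList)).filter
          (fun q => PySem.List.pyGetD q 0 ' ' == c) := by
  have h := PySem.Dict.getD_foldl_modify_append
    (l := pvSoft404Patterns.map
      (fun p => (PySem.List.pyGetD (PySem.Str.lower p).toList 0 ' ', (PySem.Str.lower p).toList)))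
    (d := PySem.Dict.empty) (c := c)
  rw [List.foldl_map] at h
  unfold pvByFirst
  rw [h, PySem.Dict.getD_empty, List.nil_append]
  simp [List.filter_map, List.map_map, Function.comp_def]

-- B's scan finds a hit iff some position of `rest` (offset by i in t) has one
theorem pvScanB_iff (t : List Char) (rest : List Char) (i : Nat) :
    pvScanB t rest i = true ↔
      ∃ k, ∃ hk : k < rest.length,
        (PySem.Dict.getD pvByFirst rest[k] []).any
          (fun p => PySem.Chars.startswith (t.drop (i + k)) p) = true := by
  induction rest generalizing i with
  | nil => simp [pvScanB]
  | cons c cs ih =>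
    rw [pvScanB]
    split_ifs with h
    · simp only [true_iff]
      exact ⟨0, by simp, by simpa using h⟩
    · rw [ih]
      constructor
      · rintro ⟨k, hk, hh⟩
        exact ⟨k + 1, by simpa using hk, by simpa [Nat.add_assoc, Nat.add_comm 1 k] using hh⟩
      · rintro ⟨k, hk, hh⟩
        match k with
        | 0 => exact absurd (by simpa using hh) h
        | k + 1 =>
          exact ⟨k, by simpa using hk, by simpa [Nat.add_assoc, Nat.add_comm 1 k] using hh⟩

-- every (lowered) pattern is nonempty
theorem pvPatterns_nonempty :
    ∀ p ∈ pvSoft404Patterns, (PySem.Str.lower p).toList ≠ [] := by decide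

-- the two pattern lists are the same literal
theorem pvPatterns_eq : pv404Patterns = pvSoft404Patterns := rfl

-- ===== VERDICT (by name: the statement is the Claim_ definition above) =====
theorem is_soft_404_content_spec : Claim_equal_is_soft_404_content := by
  intro text _
  unfold Spec_is_soft_404_content is_soft_404_content is_soft_404_content_alt
  rw [pvLoopA_eq_any, pvPatterns_eq]
  set t : List Char := (PySem.Str.lower text).toList with ht
  rw [Bool.eq_iff_iff, pvScanB_iff]
  simp only [List.any_eq_true]
  constructor
  · rintro ⟨p, hp, hin⟩
    have hq : PySem.Chars.isIn (PySem.Str.lower p).toList t = true := by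
      simpa [PySem.Str.isIn_eq, ht] using hin
    obtain ⟨j, hj⟩ := (PySem.Chars.exists_prefix_drop_iff_isIn _ _).mpr hq
    obtain ⟨a, q', hq'⟩ := List.exists_cons_of_ne_nil (pvPatterns_nonempty p hp)
    rw [hq'] at hj
    -- the drop at j starts with a, hence j < t.length and t[j] = a
    obtain ⟨tl, hdrop⟩ := hj
    have hjlt : j < t.length := by
      by_contra hge
      rw [List.drop_eq_nil_of_le (by omega)] at hdrop
      simp at hdrop
    have htj : t[j] = a := by
      have h0 : (t.drop j).head? = some a := by rw [← hdrop]; simp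
      rw [List.head?_drop, List.getElem?_eq_getElem hjlt] at h0
      exact Option.some.inj h0
    refine ⟨j, hjlt, (a :: q'), ?_, ?_⟩
    · rw [getD_pvByFirst, List.mem_filter]
      refine ⟨List.mem_map.mpr ⟨p, hp, hq'⟩, ?_⟩
      simp [PySem.List.pyGetD_zero_cons, htj]
    · rw [Nat.zero_add, PySem.Chars.startswith_iff]
      exact ⟨tl, hdrop⟩
  · rintro ⟨k, hk, q, hqmem, hsw⟩
    rw [getD_pvByFirst, List.mem_filter] at hqmem
    obtain ⟨p, hp, rfl⟩ := List.mem_map.mp hqmem.1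
    refine ⟨p, hp, ?_⟩
    have : PySem.Chars.isIn (PySem.Str.lower p).toList t = true := by
      rw [← PySem.Chars.exists_prefix_drop_iff_isIn]
      exact ⟨k, (PySem.Chars.startswith_iff _ _).mp (by simpa using hsw)⟩
    simpa [PySem.Str.isIn_eq, ht] using this
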